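-- pv_equiv track=rewrite | github.com/phutaekwondo/HiddenMarkov_GanNhanTuLoai | cs221.py | string_to_words
-- ===== SOURCE A (Python) =====
-- def string_to_words( str ):
-- 	str = str.lower()
-- 	str = str.replace(",", " ")
-- 	str = str.replace(".", " ")
-- 	str = str.replace("?", " ")
-- 	str = str.replace(";", " ")
-- 	str = str.replace(":", " ")
-- 	str = str.replace("!", " ")
-- 	str = str.replace("%", " ")
--
-- 	words = []
--
-- 	for w in str.split(" "):
-- 		if w != "":
-- 			words.append( w )
--
-- 	return words
-- ===== SOURCE B (Python) =====
-- def string_to_words(str):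
--     s = str.lower()
--     delims = {',', '.', '?', ';', ':', '!', '%', ' '}
--     words = []
--     buf = ''
--     for c in s:
--         if c in delims:
--             if buf != '':
--                 words.append(buf)
--             buf = ''
--         else:
--             buf = buf + c
--     if buf != '':
--         words.append(buf)
--     return words
-- ===== Notes on version B (the rewrite author's own statement) =====
-- stated objective: alternative
-- what changed: Replaces A's seven sequential full-string replace passes plus split-and-filter with a single buffered character scan over the lowercased string that emits words directly; it trades A's multiple C-level library passes for one explicit pass.
import Mathlib
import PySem

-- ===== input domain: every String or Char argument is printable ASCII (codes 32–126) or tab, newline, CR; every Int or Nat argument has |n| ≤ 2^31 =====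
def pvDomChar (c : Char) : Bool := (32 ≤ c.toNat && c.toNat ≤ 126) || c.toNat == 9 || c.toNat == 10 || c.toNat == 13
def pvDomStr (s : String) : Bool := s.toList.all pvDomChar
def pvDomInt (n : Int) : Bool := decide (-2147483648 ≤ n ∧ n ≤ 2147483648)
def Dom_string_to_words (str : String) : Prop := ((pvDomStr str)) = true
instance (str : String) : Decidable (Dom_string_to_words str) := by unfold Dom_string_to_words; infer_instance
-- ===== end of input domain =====

-- Program B replaces A's seven full-string replace passes + split with one buffered scan (objective: alternative single-pass decomposition).
-- ===== PORT A =====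
def string_to_words (str : String) : List String :=
  let s1 := PySem.Str.lower str
  let s2 := PySem.Str.replace s1 "," " "
  let s3 := PySem.Str.replace s2 "." " "
  let s4 := PySem.Str.replace s3 "?" " "
  let s5 := PySem.Str.replace s4 ";" " "
  let s6 := PySem.Str.replace s5 ":" " "
  let s7 := PySem.Str.replace s6 "!" " "
  let s8 := PySem.Str.replace s7 "%" " "
  -- split(" "): sep is non-empty, so split? is always `some`; getD [] only discharges the option
  let parts := (PySem.Str.split? s8 " ").getD []
  parts.foldl (fun words w => if w ≠ "" then words ++ [w] else words) []

-- ===== PORT B =====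
def pvDelims : List Char := [',', '.', '?', ';', ':', '!', '%', ' ']

-- the buffered scan of Source B: buf is the current word (in order), words the output so far
def pvScan : List Char → List Char → List String → List String
  | [], buf, words => if buf ≠ [] then words ++ [String.ofList buf] else words
  | c :: t, buf, words =>
      if c ∈ pvDelims then
        pvScan t [] (if buf ≠ [] then words ++ [String.ofList buf] else words)
      else
        pvScan t (buf ++ [c]) words

def string_to_words_alt (str : String) : List String :=
  pvScan (PySem.Str.lower str).toList [] []

-- ===== PRECONDITION & SPEC =====
def Spec_string_to_words (str : String) (out : List String) : Prop := out = string_to_words_alt str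
instance (str : String) (out : List String) : Decidable (Spec_string_to_words str out) := by unfold Spec_string_to_words; infer_instance

-- ===== CLAIM (what is proved, stated in full; the proofs are below) =====
def Claim_equal_string_to_words : Prop := ∀ (str : String), Dom_string_to_words str → Spec_string_to_words str (string_to_words str)

-- ===== LEMMAS AND PROOFS =====

-- one replace pass, per character; pvG = the composite of A's seven passes
def pvF (o : Char) (c : Char) : Char := if c = o then ' ' else c
def pvG (c : Char) : Char :=
  pvF '%' (pvF '!' (pvF ':' (pvF ';' (pvF '?' (pvF '.' (pvF ',' c))))))

-- split-on-space characterisation with the current piece kept in order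
def pvTok : List Char → List Char → List (List Char)
  | [], pref => [pref]
  | c :: t, pref => if c = ' ' then pref :: pvTok t [] else pvTok t (pref ++ [c])

theorem pvReplaceGo_single (o n : Char) (l : List Char) (fuel : Nat) (acc : List Char)
    (h : l.length ≤ fuel) :
    PySem.Chars.replace.go [o] [n] fuel l acc
      = acc.reverse ++ l.map (fun c => if c = o then n else c) := by
  induction l generalizing fuel acc with
  | nil => cases fuel <;> simp [PySem.Chars.replace.go]
  | cons c t ih =>
    cases fuel with
    | zero => simp at h
    | succ k =>
      have h' : t.length ≤ k := by simp at h; omega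
      by_cases hc : c = o
      · have step : PySem.Chars.replace.go [o] [n] (k + 1) (c :: t) acc
            = PySem.Chars.replace.go [o] [n] k t (n :: acc) := by
          simp [PySem.Chars.replace.go, List.isPrefixOf, hc]
        rw [step, ih k (n :: acc) h']
        simp [hc]
      · have hb : (o == c) = false := by simp [Ne.symm hc]
        have step : PySem.Chars.replace.go [o] [n] (k + 1) (c :: t) acc
            = PySem.Chars.replace.go [o] [n] k t (c :: acc) := by
          simp [PySem.Chars.replace.go, List.isPrefixOf, hb]
        rw [step, ih k (c :: acc) h']
        simp [hc]

theorem pvReplace_single (o n : Char) (l : List Char) :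
    PySem.Chars.replace l [o] [n] = l.map (fun c => if c = o then n else c) := by
  simp [PySem.Chars.replace, pvReplaceGo_single o n l l.length [] le_rfl]

theorem pvSplitGo_space (l : List Char) (fuel : Nat) (cur : List Char) (acc : List (List Char))
    (h : l.length + 1 ≤ fuel) :
    PySem.Chars.splitOn.go [' '] fuel l cur acc
      = acc.reverse ++ pvTok l cur.reverse := by
  induction l generalizing fuel cur acc with
  | nil =>
    cases fuel with
    | zero => simp at h
    | succ k => simp [PySem.Chars.splitOn.go, pvTok]
  | cons c t ih =>
    cases fuel with
    | zero => simp at h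
    | succ k =>
      have h' : t.length + 1 ≤ k := by simp at h; omega
      by_cases hc : c = ' '
      · have step : PySem.Chars.splitOn.go [' '] (k + 1) (c :: t) cur acc
            = PySem.Chars.splitOn.go [' '] k t [] (cur.reverse :: acc) := by
          simp [PySem.Chars.splitOn.go, List.isPrefixOf, hc]
        rw [step, ih k [] (cur.reverse :: acc) h']
        simp [pvTok, hc]
      · have hb : (' ' == c) = false := by simp [Ne.symm hc]
        have step : PySem.Chars.splitOn.go [' '] (k + 1) (c :: t) cur acc
            = PySem.Chars.splitOn.go [' '] k t (c :: cur) acc := by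
          simp [PySem.Chars.splitOn.go, List.isPrefixOf, hb]
        rw [step, ih k (c :: cur) acc h']
        simp [pvTok, hc]

theorem pvSplitOn_space (l : List Char) :
    PySem.Chars.splitOn l [' '] = pvTok l [] := by
  have := pvSplitGo_space l (l.length + 1) [] [] le_rfl
  simpa [PySem.Chars.splitOn] using this

theorem pvG_delim (c : Char) (h : c ∈ pvDelims) : pvG c = ' ' := by
  fin_cases h <;> decide

theorem pvG_not_delim (c : Char) (h : c ∉ pvDelims) : pvG c = c := by
  simp only [pvDelims, List.mem_cons, List.not_mem_nil, or_false, not_or] at h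
  obtain ⟨h1, h2, h3, h4, h5, h6, h7, h8⟩ := h
  simp [pvG, pvF, h1, h2, h3, h4, h5, h6, h7]

theorem pvScan_eq (l : List Char) (buf : List Char) (words : List String) :
    pvScan l buf words
      = words ++ ((pvTok (l.map pvG) buf).filter (fun w => !decide (w = []))).map String.ofList := by
  induction l generalizing buf words with
  | nil =>
    by_cases hb : buf = [] <;> simp [pvScan, pvTok, hb]
  | cons c t ih =>
    by_cases hc : c ∈ pvDelims
    · have hg := pvG_delim c hc
      by_cases hb : buf = [] <;>
        simp [pvScan, hc, hb, hg, pvTok, ih]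
    · have hg := pvG_not_delim c hc
      have hsp : c ≠ ' ' := fun h => hc (h ▸ by simp [pvDelims])
      simp [pvScan, hc, hg, pvTok, hsp, ih]

theorem pvMk_filter (L : List (List Char)) :
    (L.map String.ofList).filter (fun w => !decide (w = ""))
      = (L.filter (fun w => !decide (w = []))).map String.ofList := by
  induction L with
  | nil => rfl
  | cons x t ih => by_cases hx : x = [] <;> simp [hx, ih]

theorem pvParts (s : String) :
    (PySem.Str.split? s " ").getD [] = (pvTok s.toList []).map String.ofList := by
  have hsep : (" " : String).toList = [' '] := rfl
  have h := PySem.Str.split?_map s " "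
  cases hsp : PySem.Str.split? s " " with
  | none => rw [hsp] at h; simp [PySem.Chars.split?, hsep] at h
  | some parts =>
    rw [hsp] at h
    simp [PySem.Chars.split?, hsep] at h
    have hp : parts = (PySem.Chars.splitOn s.toList [' ']).map String.ofList := by
      have h2 := congrArg (List.map String.ofList) h
      simpa [List.map_map, Function.comp_def] using h2
    simp [hp, pvSplitOn_space]

theorem pvA_eq (str : String) :
    string_to_words str
      = ((pvTok ((PySem.Chars.lower str.toList).map pvG) []).filter (fun w => !decide (w = []))).map String.ofList := by
  have hlist : (PySem.Str.replace (PySem.Str.replace (PySem.Str.replace (PySem.Str.replace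
      (PySem.Str.replace (PySem.Str.replace (PySem.Str.replace (PySem.Str.lower str) "," " ")
      "." " ") "?" " ") ";" " ") ":" " ") "!" " ") "%" " ").toList
      = (PySem.Chars.lower str.toList).map pvG := by
    simp only [PySem.Str.toList_replace, PySem.Str.toList_lower]
    have h1 : ("," : String).toList = [','] := rfl
    have h2 : ("." : String).toList = ['.'] := rfl
    have h3 : ("?" : String).toList = ['?'] := rfl
    have h4 : (";" : String).toList = [';'] := rfl
    have h5 : (":" : String).toList = [':'] := rfl
    have h6 : ("!" : String).toList = ['!'] := rfl
    have h7 : ("%" : String).toList = ['%'] := rfl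
    have hsp : (" " : String).toList = [' '] := rfl
    rw [h1, h2, h3, h4, h5, h6, h7, hsp]
    have hrf : ∀ (o : Char) (l : List Char), PySem.Chars.replace l [o] [' '] = l.map (pvF o) :=
      fun o l => pvReplace_single o ' ' l
    simp only [hrf, List.map_map]
    refine List.map_congr_left fun c _ => ?_
    simp only [Function.comp_apply, pvG]
  simp only [string_to_words]
  rw [PySem.List.foldl_append_ite_eq_filter]
  simp only [ne_eq, decide_not, List.nil_append]
  rw [pvParts, pvMk_filter, hlist]

-- ===== VERDICT (by name: the statement is the Claim_ definition above) =====
theorem string_to_words_spec : Claim_equal_string_to_words := by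
  intro str _
  show string_to_words str = string_to_words_alt str
  rw [pvA_eq]
  show _ = pvScan (PySem.Str.lower str).toList [] []
  rw [pvScan_eq]
  simp [PySem.Str.toList_lower]
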